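-- pv_equiv track=rewrite | github.com/karan1dhir/CodingNinjas_Python | removePieString.py | replacePie
-- ===== SOURCE A (Python) =====
-- def replacePie(inputString):
--     if len(inputString) == 0 or len(inputString) == 1:
--         return inputString
--
--     if inputString[0] == 'p' and inputString[1] == 'i':
--        smallAns =  replacePie(inputString[2:])
--        return '3.14' + smallAns;
--     else:
--         smallAns =  replacePie(inputString[1:])
--         return inputString[0] + smallAns
-- ===== SOURCE B (Python) =====
-- def replacePie(inputString):
--     return inputString.replace('pi', '3.14')
-- ===== Notes on version B (the rewrite author's own statement) =====
-- stated objective: idiomatic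
-- what changed: Replaces the char-by-char recursion (with explicit length-0/1 base cases and string slicing) by a single call to str.replace, which performs the same left-to-right non-overlapping substitution.
import Mathlib
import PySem

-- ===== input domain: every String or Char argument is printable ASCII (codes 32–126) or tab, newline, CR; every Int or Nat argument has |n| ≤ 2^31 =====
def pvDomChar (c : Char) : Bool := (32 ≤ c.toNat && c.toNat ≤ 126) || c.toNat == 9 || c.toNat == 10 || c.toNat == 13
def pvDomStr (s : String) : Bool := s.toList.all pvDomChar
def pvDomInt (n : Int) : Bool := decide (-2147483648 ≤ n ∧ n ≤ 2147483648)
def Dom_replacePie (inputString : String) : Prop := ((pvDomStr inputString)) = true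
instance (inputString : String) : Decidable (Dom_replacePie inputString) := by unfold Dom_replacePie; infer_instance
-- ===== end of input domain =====

-- B is the idiomatic one-liner str.replace('pi', '3.14') instead of A's char-by-char recursion.

-- ===== PORT A =====
-- A's recursion, transliterated on the character list: len 0/1 base cases,
-- s[0]/s[1] tests, s[2:] / s[1:] recursive calls.
def replacePieGo : List Char → List Char
  | [] => []
  | [c] => [c]
  | c1 :: c2 :: rest =>
      if c1 = 'p' ∧ c2 = 'i' then
        '3' :: '.' :: '1' :: '4' :: replacePieGo rest
      else
        c1 :: replacePieGo (c2 :: rest)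

def replacePie (inputString : String) : String :=
  String.ofList (replacePieGo inputString.toList)

-- ===== PORT B =====
def replacePie_alt (inputString : String) : String :=
  PySem.Str.replace inputString "pi" "3.14"

-- ===== PRECONDITION & SPEC =====
def Spec_replacePie (inputString : String) (out : String) : Prop := out = replacePie_alt inputString
instance (inputString : String) (out : String) : Decidable (Spec_replacePie inputString out) := by unfold Spec_replacePie; infer_instance

-- ===== CLAIM (what is proved, stated in full; the proofs are below) =====
def Claim_equal_replacePie : Prop := ∀ (inputString : String), Dom_replacePie inputString → Spec_replacePie inputString (replacePie inputString)

-- ===== LEMMAS AND PROOFS =====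

lemma replacePie_go_eq (l : List Char) :
    ∀ (fuel : Nat) (acc : List Char), l.length ≤ fuel →
      PySem.Chars.replace.go ['p', 'i'] ['3', '.', '1', '4'] fuel l acc
        = acc.reverse ++ replacePieGo l := by
  induction l using replacePieGo.induct with
  | case1 =>
      intro fuel acc _
      rw [PySem.Chars.replace.go.eq_def]
      cases fuel <;> simp [replacePieGo]
  | case2 c =>
      intro fuel acc h
      match fuel with
      | f + 1 =>
        rw [PySem.Chars.replace.go.eq_def]
        have hnp : List.isPrefixOf ['p', 'i'] [c] = false := by
          simp [List.isPrefixOf]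
        simp only [hnp, Bool.false_eq_true, if_false]
        rw [PySem.Chars.replace.go.eq_def]
        cases f <;> simp [replacePieGo]
  | case3 c1 c2 rest hpi ih =>
      intro fuel acc h
      match fuel with
      | f + 1 =>
        obtain ⟨h1, h2⟩ := hpi
        rw [PySem.Chars.replace.go.eq_def]
        have hp : List.isPrefixOf ['p', 'i'] (c1 :: c2 :: rest) = true := by
          subst h1 h2; simp [List.isPrefixOf]
        simp only [hp, if_true, List.length_cons, List.length_nil, List.drop_succ_cons,
          List.drop_zero]
        rw [ih f _ (by simp at h; omega)]
        subst h1 h2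
        simp [replacePieGo]
  | case4 c1 c2 rest hpi ih =>
      intro fuel acc h
      match fuel with
      | f + 1 =>
        rw [PySem.Chars.replace.go.eq_def]
        have hp : List.isPrefixOf ['p', 'i'] (c1 :: c2 :: rest) = false := by
          rcases (not_and_or.mp hpi) with h1 | h2
          · simp [List.isPrefixOf, beq_iff_eq]
            intro hc; exact absurd hc.symm h1
          · simp [List.isPrefixOf, beq_iff_eq]
            intro _ hc; exact absurd hc.symm h2
        simp only [hp, Bool.false_eq_true, if_false]
        rw [ih f _ (by simp at h ⊢; omega)]
        simp [replacePieGo, hpi]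

lemma replacePie_chars (l : List Char) :
    replacePieGo l = PySem.Chars.replace l ['p', 'i'] ['3', '.', '1', '4'] := by
  rw [PySem.Chars.replace]
  simp only [List.isEmpty, Bool.false_eq_true, if_false]
  rw [replacePie_go_eq l l.length [] le_rfl]
  simp

-- ===== VERDICT (by name: the statement is the Claim_ definition above) =====
theorem replacePie_spec : Claim_equal_replacePie := by
  intro s _
  unfold Spec_replacePie replacePie replacePie_alt
  rw [PySem.Str.replace, replacePie_chars]
  rfl
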